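-- pv_equiv track=rewrite | github.com/saurav7007/analysis_multiseq | analysis_multiseq/fasta_utils.py | orf_extremas
-- ===== SOURCE A (Python) =====
-- def orf_extremas(orf_dictionary: dict, extrema: str = "min") -> dict[str, list[tuple[int, str, int]]]:
--     """
--     Find ORFs with maximum and minimum lengths for a sequence_id.
--
--     Args:
--         orf_dictionary (dict): Dictionary of ORFS {sequence_id: [(orf1_pos, orf1_seq, orf1_len), (orf2_pos, orf2_seq, orf2_len), ...]}
--         extreme (str): "min" or "max"
--
--     Returns:
--         dict: {sequence_id: [(orf1_pos, orf1_seq, orf1_len), orf2_pos, orf2_seq, orf2_len, ...]}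
--     """
--     extremas = {}
--
--     for seq_id, orf_list in orf_dictionary.items():
--         if orf_list == []:
--             extremas[seq_id] = []
--             continue
--         elif extrema == "min":
--             extrema_len = min(orf[2] for orf in orf_list)
--         elif extrema == "max":
--             extrema_len = max(orf[2] for orf in orf_list)
--         else:
--             raise ValueError("extrema must be 'min' or 'max'")
--
--         orf_extrema = [orf for orf in orf_list if orf[2] == extrema_len]
--
--         extremas[seq_id] = orf_extrema
--
--     return extremas
-- ===== SOURCE B (Python) =====
-- def orf_extremas(orf_dictionary: dict, extrema: str = "min") -> dict[str, list[tuple[int, str, int]]]: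
--     extremas = {}
--     for seq_id, orf_list in orf_dictionary.items():
--         if not orf_list:
--             extremas[seq_id] = []
--             continue
--         if extrema != "min" and extrema != "max":
--             raise ValueError("extrema must be 'min' or 'max'")
--         want_min = extrema == "min"
--         best = orf_list[0][2]
--         acc = [orf_list[0]]
--         for orf in orf_list[1:]:
--             length = orf[2]
--             if (length < best) if want_min else (length > best):
--                 best = length
--                 acc = [orf]
--             elif length == best:
--                 acc.append(orf)
--         extremas[seq_id] = acc
--     return extremas
-- ===== Notes on version B (the rewrite author's own statement) =====
-- stated objective: alternative
-- what changed: Per sequence, A computes the extremal length with a separate min/max pass over the lengths and then a second filtering pass; B makes a single pass per list maintaining a running best length and an accumulator of currently-extremal ORFs, resetting on a strict improvement and appending on a tie.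
import Mathlib
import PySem

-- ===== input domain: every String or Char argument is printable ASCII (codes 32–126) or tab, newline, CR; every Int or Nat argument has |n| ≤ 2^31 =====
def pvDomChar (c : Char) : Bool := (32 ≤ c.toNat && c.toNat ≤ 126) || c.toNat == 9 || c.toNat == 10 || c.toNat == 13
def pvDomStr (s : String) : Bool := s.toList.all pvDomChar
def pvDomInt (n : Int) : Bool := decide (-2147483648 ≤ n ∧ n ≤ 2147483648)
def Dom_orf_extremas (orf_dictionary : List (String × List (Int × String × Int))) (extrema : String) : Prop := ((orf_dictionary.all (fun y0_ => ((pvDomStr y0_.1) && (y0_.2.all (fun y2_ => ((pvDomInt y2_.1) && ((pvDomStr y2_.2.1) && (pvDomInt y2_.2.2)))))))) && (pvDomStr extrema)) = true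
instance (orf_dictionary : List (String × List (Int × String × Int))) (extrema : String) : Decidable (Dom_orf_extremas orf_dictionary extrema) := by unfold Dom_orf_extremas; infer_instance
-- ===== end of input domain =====

-- B replaces A's two passes per list (min/max of lengths, then a filter) by one pass with a
-- running best length and an accumulator of currently-extremal ORFs (alternative decomposition,
-- same cost); return-value equivalence only.


-- ===== PORT A =====
def orf_extremas (orf_dictionary : List (String × List (Int × String × Int))) (extrema : String) : List (String × List (Int × String × Int)) :=
  orf_dictionary.foldl (fun extremas p =>
    if p.2 = [] then extremas ++ [(p.1, [])]
    else if extrema = "min" then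
      let extrema_len := (PySem.List.min? (p.2.map (fun orf => orf.2.2)) (fun y => y)).getD 0
      extremas ++ [(p.1, p.2.filter (fun orf => orf.2.2 == extrema_len))]
    else if extrema = "max" then
      let extrema_len := (PySem.List.max? (p.2.map (fun orf => orf.2.2)) (fun y => y)).getD 0
      extremas ++ [(p.1, p.2.filter (fun orf => orf.2.2 == extrema_len))]
    else extremas  -- Python raises ValueError here; excluded by Pre_orf_extremas
  ) []

-- ===== PORT B =====
-- one pass: running best length, reset the accumulator on a strict improvement, append on a tie
def altScan (wantMin : Bool) : List (Int × String × Int) → Int → List (Int × String × Int) → List (Int × String × Int)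
  | [], _, acc => acc
  | orf :: rest, best, acc =>
    let length := orf.2.2
    if (if wantMin then length < best else best < length) then altScan wantMin rest length [orf]
    else if length = best then altScan wantMin rest best (acc ++ [orf])
    else altScan wantMin rest best acc

def orf_extremas_alt (orf_dictionary : List (String × List (Int × String × Int))) (extrema : String) : List (String × List (Int × String × Int)) :=
  orf_dictionary.foldl (fun extremas p =>
    match p.2 with
    | [] => extremas ++ [(p.1, [])]
    | orf0 :: rest => extremas ++ [(p.1, altScan (extrema == "min") rest orf0.2.2 [orf0])]
  ) []

-- ===== PRECONDITION & SPEC =====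
-- A raises ValueError when extrema is neither "min" nor "max" and some ORF list is non-empty;
-- duplicate keys are excluded because a Python dict argument cannot contain them.
def Pre_orf_extremas (orf_dictionary : List (String × List (Int × String × Int))) (extrema : String) : Prop :=
  (extrema = "min" ∨ extrema = "max" ∨ ∀ p ∈ orf_dictionary, p.2 = []) ∧
  (orf_dictionary.map (fun p => p.1)).Nodup
instance (orf_dictionary : List (String × List (Int × String × Int))) (extrema : String) : Decidable (Pre_orf_extremas orf_dictionary extrema) := by unfold Pre_orf_extremas; infer_instance

def pvWitness_orf_extremas : (List (String × List (Int × String × Int))) × String :=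
  ([("s1", [(0, "ATG", 3), (4, "ATGTAA", 6), (12, "TAA", 3)]), ("s2", [])], "min")

def Spec_orf_extremas (orf_dictionary : List (String × List (Int × String × Int))) (extrema : String) (out : List (String × List (Int × String × Int))) : Prop := out = orf_extremas_alt orf_dictionary extrema
instance (orf_dictionary : List (String × List (Int × String × Int))) (extrema : String) (out : List (String × List (Int × String × Int))) : Decidable (Spec_orf_extremas orf_dictionary extrema out) := by unfold Spec_orf_extremas; infer_instance

-- ===== CLAIM (what is proved, stated in full; the proofs are below) =====
def Claim_equal_orf_extremas : Prop := ∀ (orf_dictionary : List (String × List (Int × String × Int))) (extrema : String), Dom_orf_extremas orf_dictionary extrema → Pre_orf_extremas orf_dictionary extrema → Spec_orf_extremas orf_dictionary extrema (orf_extremas orf_dictionary extrema)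

-- ===== LEMMAS AND PROOFS =====

lemma foldl_min_le_init (l : List Int) : ∀ a : Int, l.foldl min a ≤ a := by
  induction l with
  | nil => intro a; simp
  | cons x t ih => intro a; exact le_trans (ih (min a x)) (min_le_left a x)

lemma altScan_min (rest : List (Int × String × Int)) : ∀ (best : Int) (acc : List (Int × String × Int)),
    altScan true rest best acc =
      (if best = (rest.map (fun o => o.2.2)).foldl min best then acc else []) ++
        rest.filter (fun o => o.2.2 == (rest.map (fun o => o.2.2)).foldl min best) := by
  induction rest with
  | nil => intro best acc; simp [altScan]
  | cons x t ih =>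
    intro best acc
    simp only [altScan, List.map_cons, List.foldl_cons, List.filter_cons, if_true]
    by_cases h1 : x.2.2 < best
    · rw [if_pos h1, ih]
      have hm : min best x.2.2 = x.2.2 := min_eq_right (le_of_lt h1)
      simp only [hm]
      have hlt : (t.map (fun o => o.2.2)).foldl min x.2.2 < best :=
        lt_of_le_of_lt (foldl_min_le_init _ _) h1
      rw [if_neg (by omega : ¬ best = (t.map (fun o => o.2.2)).foldl min x.2.2)]
      by_cases h2 : x.2.2 = (t.map (fun o => o.2.2)).foldl min x.2.2
      · simp [← h2]
      · simp [h2, beq_iff_eq]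
    · rw [if_neg h1]
      have hm : min best x.2.2 = best := min_eq_left (by omega)
      simp only [hm]
      by_cases h2 : x.2.2 = best
      · rw [if_pos h2, ih]
        by_cases h3 : best = (t.map (fun o => o.2.2)).foldl min best
        · simp [← h3, h2]
        · have : ¬ x.2.2 = (t.map (fun o => o.2.2)).foldl min best := by omega
          simp [h3, this, beq_iff_eq]
      · rw [if_neg h2, ih]
        have hle : (t.map (fun o => o.2.2)).foldl min best ≤ best := foldl_min_le_init _ _
        have : ¬ x.2.2 = (t.map (fun o => o.2.2)).foldl min best := by omega
        simp [this, beq_iff_eq]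

lemma init_le_foldl_max (l : List Int) : ∀ a : Int, a ≤ l.foldl max a := by
  induction l with
  | nil => intro a; simp
  | cons x t ih => intro a; exact le_trans (le_max_left a x) (ih (max a x))

lemma altScan_max (rest : List (Int × String × Int)) : ∀ (best : Int) (acc : List (Int × String × Int)),
    altScan false rest best acc =
      (if best = (rest.map (fun o => o.2.2)).foldl max best then acc else []) ++
        rest.filter (fun o => o.2.2 == (rest.map (fun o => o.2.2)).foldl max best) := by
  induction rest with
  | nil => intro best acc; simp [altScan]
  | cons x t ih =>
    intro best acc
    simp only [altScan, List.map_cons, List.foldl_cons, List.filter_cons, Bool.false_eq_true,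
      if_false]
    by_cases h1 : best < x.2.2
    · rw [if_pos h1, ih]
      have hm : max best x.2.2 = x.2.2 := max_eq_right (le_of_lt h1)
      simp only [hm]
      have hlt : best < (t.map (fun o => o.2.2)).foldl max x.2.2 :=
        lt_of_lt_of_le h1 (init_le_foldl_max _ _)
      rw [if_neg (by omega : ¬ best = (t.map (fun o => o.2.2)).foldl max x.2.2)]
      by_cases h2 : x.2.2 = (t.map (fun o => o.2.2)).foldl max x.2.2
      · simp [← h2]
      · simp [h2, beq_iff_eq]
    · rw [if_neg h1]
      have hm : max best x.2.2 = best := max_eq_left (by omega)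
      simp only [hm]
      by_cases h2 : x.2.2 = best
      · rw [if_pos h2, ih]
        by_cases h3 : best = (t.map (fun o => o.2.2)).foldl max best
        · simp [← h3, h2]
        · have : ¬ x.2.2 = (t.map (fun o => o.2.2)).foldl max best := by omega
          simp [h3, this, beq_iff_eq]
      · rw [if_neg h2, ih]
        have hle : best ≤ (t.map (fun o => o.2.2)).foldl max best := init_le_foldl_max _ _
        have : ¬ x.2.2 = (t.map (fun o => o.2.2)).foldl max best := by omega
        simp [this, beq_iff_eq]

-- ===== VERDICT (by name: the statement is the Claim_ definition above) =====
theorem orf_extremas_spec : Claim_equal_orf_extremas := by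
  intro d extrema _hdom hpre
  unfold Spec_orf_extremas orf_extremas orf_extremas_alt
  apply PySem.List.foldl_congr_mem
  intro acc p hp
  match hl : p.2 with
  | [] => simp
  | orf0 :: rest =>
    have hval : extrema = "min" ∨ extrema = "max" := by
      rcases hpre.1 with h | h | h
      · exact Or.inl h
      · exact Or.inr h
      · exact absurd (h p hp) (by simp [hl])
    rw [if_neg (by simp [hl])]
    rcases hval with h | h
    · subst h
      rw [if_pos rfl]
      have hb : ("min" == "min") = true := rfl
      simp only [hb, List.map_cons, PySem.List.min?_id_cons, Option.getD_some, altScan_min,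
        List.filter_cons]
      by_cases h2 : orf0.2.2 = (rest.map (fun o => o.2.2)).foldl min orf0.2.2
      · simp [← h2]
      · simp [beq_iff_eq, h2]
    · subst h
      rw [if_neg (by decide), if_pos rfl]
      have hb : ("max" == "min") = false := rfl
      simp only [hb, List.map_cons, PySem.List.max?_id_cons, Option.getD_some, altScan_max,
        List.filter_cons]
      by_cases h2 : orf0.2.2 = (rest.map (fun o => o.2.2)).foldl max orf0.2.2
      · simp [← h2]
      · simp [beq_iff_eq, h2]
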